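-- pv_equiv track=rewrite | github.com/apple/ml-hilbert | src/tools/proof_utils.py | split_header_body
-- ===== SOURCE A (Python) =====
-- def split_header_body(proof: str) -> tuple[str, str]:
--     """
--     Splits `proof` into:
--     - header: the consecutive `import ...` lines at the beginning of the proof.
--     We remove all "import Mathlib." lines and add "import Mathlib" if necessary.
--     - body: rest of the proof
--
--     Args:
--         proof (str): The proof code to split
--
--     Returns:
--         tuple[str, str]: The header and body of the proof
--     """
--     proof = proof.strip()
--     lines = proof.splitlines()
--     header_lines = []
--     proof_idx = 0
--
--     mathlib_found = False
--     for i, line in enumerate(lines):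
--         line = line.strip()
--         if line.startswith("import"):
--             if line.startswith("import Mathlib."):
--                 mathlib_found = True
--             else:
--                 header_lines.append(line)
--             proof_idx = i + 1
--         else:
--             break
--     if mathlib_found and 'import Mathlib' not in header_lines:
--         header_lines.insert(0, 'import Mathlib')
--     header = "\n".join(header_lines).strip()
--     body = "\n".join(lines[proof_idx:]).strip()
--
--     return header, body
-- ===== SOURCE B (Python) =====
-- def split_header_body(proof: str) -> tuple[str, str]:
--     def go(lines):
--         # returns (header_lines, mathlib_found, body_lines) by structural recursion
--         if not lines:
--             return [], False, []
--         first = lines[0].strip()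
--         if not first.startswith("import"):
--             return [], False, lines
--         hdr, mf, body = go(lines[1:])
--         if first.startswith("import Mathlib."):
--             return hdr, True, body
--         return [first] + hdr, mf, body
--
--     hdr, mf, body = go(proof.strip().splitlines())
--     if mf and "import Mathlib" not in hdr:
--         hdr = ["import Mathlib"] + hdr
--     return "\n".join(hdr).strip(), "\n".join(body).strip()
-- ===== Notes on version B (the rewrite author's own statement) =====
-- stated objective: alternative
-- what changed: Replaces A's iterative enumerate-loop with mutable state (header list, proof_idx index, mathlib flag, break) by a structural recursion on the line list that returns the (header, mathlib_found, body) triple directly on the unwind, building the header back-to-front by prepending and carrying the body lines instead of an index.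
import Mathlib
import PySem

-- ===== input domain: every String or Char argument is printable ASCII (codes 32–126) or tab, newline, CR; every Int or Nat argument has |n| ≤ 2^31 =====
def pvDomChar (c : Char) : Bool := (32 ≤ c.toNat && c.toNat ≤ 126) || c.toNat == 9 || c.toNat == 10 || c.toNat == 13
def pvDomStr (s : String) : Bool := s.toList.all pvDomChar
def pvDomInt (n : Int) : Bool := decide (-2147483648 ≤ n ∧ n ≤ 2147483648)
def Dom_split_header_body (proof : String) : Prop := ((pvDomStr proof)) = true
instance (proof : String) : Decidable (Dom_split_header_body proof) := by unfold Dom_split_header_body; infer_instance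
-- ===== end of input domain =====

-- B replaces A's iterative loop with mutable state (header list, proof_idx, mathlib flag, break)
-- by a structural recursion returning the (header, mathlib_found, body) triple directly; alternative decomposition, same cost.

-- ===== PORT A =====
-- the for-loop with break, state = (header_lines, proof_idx, mathlib_found); i is the enumerate index
def splitA_loop : List String → Int → (List String × Int × Bool) → (List String × Int × Bool)
  | [], _, st => st
  | l :: rest, i, (hdr, pidx, mf) =>
    let line := PySem.Str.strip l
    if PySem.Str.startswith line "import" then
      if PySem.Str.startswith line "import Mathlib." then
        splitA_loop rest (i + 1) (hdr, i + 1, true)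
      else
        splitA_loop rest (i + 1) (hdr ++ [line], i + 1, mf)
    else
      (hdr, pidx, mf)

def split_header_body (proof : String) : String × String :=
  let proof := PySem.Str.strip proof
  let lines := PySem.Str.splitlines proof
  let st := splitA_loop lines 0 ([], 0, false)
  let header_lines := st.1
  let proof_idx := st.2.1
  let mathlib_found := st.2.2
  let header_lines :=
    if mathlib_found && !(header_lines.contains "import Mathlib") then
      "import Mathlib" :: header_lines            -- header_lines.insert(0, 'import Mathlib')
    else header_lines
  (PySem.Str.strip (PySem.Str.join "\n" header_lines),
   PySem.Str.strip (PySem.Str.join "\n" (PySem.List.slice lines (some proof_idx) none)))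

-- ===== PORT B =====
-- go: structural recursion on the line list, returning (header_lines, mathlib_found, body_lines)
def altGo : List String → List String × Bool × List String
  | [] => ([], false, [])
  | l :: rest =>
    let first := PySem.Str.strip l
    if PySem.Str.startswith first "import" then
      let r := altGo rest
      if PySem.Str.startswith first "import Mathlib." then
        (r.1, true, r.2.2)
      else
        (first :: r.1, r.2.1, r.2.2)
    else
      ([], false, l :: rest)

def split_header_body_alt (proof : String) : String × String :=
  let r := altGo (PySem.Str.splitlines (PySem.Str.strip proof))
  let hdr := r.1
  let mf := r.2.1
  let body := r.2.2
  let hdr :=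
    if mf && !(hdr.contains "import Mathlib") then "import Mathlib" :: hdr else hdr
  (PySem.Str.strip (PySem.Str.join "\n" hdr),
   PySem.Str.strip (PySem.Str.join "\n" body))

-- ===== PRECONDITION & SPEC =====
def Spec_split_header_body (proof : String) (out : String × String) : Prop := out = split_header_body_alt proof
instance (proof : String) (out : String × String) : Decidable (Spec_split_header_body proof out) := by unfold Spec_split_header_body; infer_instance

-- ===== CLAIM (what is proved, stated in full; the proofs are below) =====
def Claim_equal_split_header_body : Prop := ∀ (proof : String), Dom_split_header_body proof → Spec_split_header_body proof (split_header_body proof)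

-- ===== LEMMAS AND PROOFS =====

-- proof-side helper: length of the maximal "import" prefix of the stripped lines
def prefLen : List String → Nat
  | [] => 0
  | l :: rest => if PySem.Str.startswith l "import" then prefLen rest + 1 else 0

theorem splitA_loop_eq (ls : List String) (k p0 : Int) (h0 : List String) (m0 : Bool) :
    splitA_loop ls k (h0, p0, m0) =
      (h0 ++ (((ls.map PySem.Str.strip).take (prefLen (ls.map PySem.Str.strip))).filter
                (fun l => !(PySem.Str.startswith l "import Mathlib."))),
       (if prefLen (ls.map PySem.Str.strip) = 0 then p0
        else k + (prefLen (ls.map PySem.Str.strip) : Int)),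
       m0 || ((ls.map PySem.Str.strip).take (prefLen (ls.map PySem.Str.strip))).any
                (fun l => PySem.Str.startswith l "import Mathlib.")) := by
  induction ls generalizing k p0 h0 m0 with
  | nil => simp only [splitA_loop, List.map_nil, prefLen, List.take_nil, List.filter_nil,
      List.append_nil, List.any_nil, Bool.or_false, if_true]
  | cons l rest ih =>
    by_cases h1 : PySem.Str.startswith (PySem.Str.strip l) "import"
    · by_cases h2 : PySem.Str.startswith (PySem.Str.strip l) "import Mathlib."
      · simp only [splitA_loop, h1, h2, if_true, ih, List.map_cons, prefLen,
          List.take_succ_cons, List.filter_cons, List.any_cons, Bool.not_true,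
          Bool.false_eq_true, if_false, Bool.true_or, Bool.or_true, Nat.add_one_ne_zero,
          Prod.mk.injEq]
        refine ⟨trivial, ?_, trivial⟩
        split <;> push_cast <;> omega
      · have h2' : PySem.Str.startswith (PySem.Str.strip l) "import Mathlib." = false :=
          Bool.not_eq_true _ ▸ eq_false_of_ne_true h2
        simp only [splitA_loop, h1, h2', if_true, Bool.false_eq_true, if_false, ih,
          List.map_cons, prefLen, List.take_succ_cons, List.filter_cons, List.any_cons,
          Bool.not_false, Bool.false_or, Nat.add_one_ne_zero, Prod.mk.injEq,
          List.append_assoc, List.singleton_append]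
        refine ⟨trivial, ?_, trivial⟩
        split <;> push_cast <;> omega
    · have h1' : PySem.Str.startswith (PySem.Str.strip l) "import" = false :=
        Bool.not_eq_true _ ▸ eq_false_of_ne_true h1
      simp only [splitA_loop, h1', Bool.false_eq_true, if_false, List.map_cons, prefLen,
        if_true, List.take_zero, List.filter_nil, List.append_nil,
        List.any_nil, Bool.or_false, if_true]

theorem altGo_eq (ls : List String) :
    altGo ls =
      (((ls.map PySem.Str.strip).take (prefLen (ls.map PySem.Str.strip))).filter
          (fun l => !(PySem.Str.startswith l "import Mathlib.")),
       ((ls.map PySem.Str.strip).take (prefLen (ls.map PySem.Str.strip))).any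
          (fun l => PySem.Str.startswith l "import Mathlib."),
       ls.drop (prefLen (ls.map PySem.Str.strip))) := by
  induction ls with
  | nil => simp only [altGo, List.map_nil, prefLen, List.take_nil, List.filter_nil,
      List.any_nil, List.drop_nil]
  | cons l rest ih =>
    by_cases h1 : PySem.Str.startswith (PySem.Str.strip l) "import"
    · by_cases h2 : PySem.Str.startswith (PySem.Str.strip l) "import Mathlib."
      · simp only [altGo, h1, h2, if_true, ih, List.map_cons, prefLen,
          List.take_succ_cons, List.filter_cons, List.any_cons, Bool.not_true,
          Bool.false_eq_true, if_false, Bool.true_or, List.drop_succ_cons]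
      · have h2' : PySem.Str.startswith (PySem.Str.strip l) "import Mathlib." = false :=
          Bool.not_eq_true _ ▸ eq_false_of_ne_true h2
        simp only [altGo, h1, h2', if_true, Bool.false_eq_true, if_false, ih,
          List.map_cons, prefLen, List.take_succ_cons, List.filter_cons, List.any_cons,
          Bool.not_false, Bool.false_or, List.drop_succ_cons]
    · have h1' : PySem.Str.startswith (PySem.Str.strip l) "import" = false :=
        Bool.not_eq_true _ ▸ eq_false_of_ne_true h1
      simp only [altGo, h1', Bool.false_eq_true, if_false, List.map_cons, prefLen,
        if_true, List.take_zero, List.filter_nil, List.any_nil, List.drop_zero]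

-- ===== VERDICT (by name: the statement is the Claim_ definition above) =====
theorem split_header_body_spec : Claim_equal_split_header_body := by
  intro proof _
  unfold Spec_split_header_body
  simp only [split_header_body, split_header_body_alt]
  rw [splitA_loop_eq, altGo_eq]
  rw [List.nil_append, Bool.false_or]
  rw [show (if prefLen ((PySem.Str.splitlines (PySem.Str.strip proof)).map PySem.Str.strip) = 0
        then (0 : Int)
        else 0 + (prefLen ((PySem.Str.splitlines (PySem.Str.strip proof)).map PySem.Str.strip) : Int))
      = (prefLen ((PySem.Str.splitlines (PySem.Str.strip proof)).map PySem.Str.strip) : Int)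
    from by split <;> omega]
  rw [PySem.List.slice_from_natCast]
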